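-- pv_equiv track=rewrite | github.com/DataDog/integrations-core | ddev/src/ddev/config/secret_command.py | _escape_unquoted_backslashes
-- ===== SOURCE A (Python) =====
-- def _escape_unquoted_backslashes(command: str) -> str:
--     """Double backslashes that appear outside quoted regions.
--
--     POSIX shlex treats a bare ``\\`` as an escape character, eating the
--     following character.  Doubling unquoted backslashes before POSIX parsing
--     ensures they survive as literal path separators.  Backslashes inside
--     single or double quotes are left untouched: POSIX shlex already handles
--     them correctly there (all chars literal inside single quotes; only special
--     chars escaped inside double quotes).
--     """
--     result = []
--     in_single = False
--     in_double = False
--     for ch in command: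
--         if ch == "'" and not in_double:
--             in_single = not in_single
--         elif ch == '"' and not in_single:
--             in_double = not in_double
--         elif ch == '\\' and not in_single and not in_double:
--             result.append('\\')  # prepend extra backslash so POSIX sees \\→\
--         result.append(ch)
--     return ''.join(result)
-- ===== SOURCE B (Python) =====
-- def _escape_unquoted_backslashes(command: str) -> str:
--     """Segment-based rewrite: split the command into quoted runs (consumed
--     whole, left untouched; an unterminated quote swallows the rest) and
--     unquoted runs (backslashes doubled), then join the segments."""
--     out = []
--     i = 0
--     n = len(command)
--     while i < n:
--         ch = command[i]
--         if ch == "'" or ch == '"':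
--             j = command.find(ch, i + 1)
--             if j == -1:
--                 out.append(command[i:])
--                 i = n
--             else:
--                 out.append(command[i:j + 1])
--                 i = j + 1
--         else:
--             j = i
--             while j < n and command[j] != "'" and command[j] != '"':
--                 j += 1
--             out.append(command[i:j].replace('\\', '\\\\'))
--             i = j
--     return ''.join(out)
-- ===== Notes on version B (the rewrite author's own statement) =====
-- stated objective: alternative
-- what changed: Replaced the per-character state machine carrying in_single/in_double flags with a segment scanner that consumes each quoted run whole (unterminated quotes swallow the rest) and doubles backslashes only in the maximal unquoted runs between them.
import Mathlib
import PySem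

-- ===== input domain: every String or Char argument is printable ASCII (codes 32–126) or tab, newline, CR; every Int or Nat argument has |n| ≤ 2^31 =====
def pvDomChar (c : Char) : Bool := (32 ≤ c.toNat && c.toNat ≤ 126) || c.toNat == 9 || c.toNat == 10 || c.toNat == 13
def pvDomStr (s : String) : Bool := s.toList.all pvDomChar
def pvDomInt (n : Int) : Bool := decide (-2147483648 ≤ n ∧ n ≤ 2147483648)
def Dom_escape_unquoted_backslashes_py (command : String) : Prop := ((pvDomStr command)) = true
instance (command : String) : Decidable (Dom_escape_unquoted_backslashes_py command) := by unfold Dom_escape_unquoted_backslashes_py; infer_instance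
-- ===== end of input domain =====

-- B replaces A's per-character quote-state machine by a segment scanner (quoted runs copied
-- whole, unquoted runs backslash-doubled); objective: alternative decomposition, same cost.

-- ===== PORT A =====
-- A's loop: per-character scan carrying the two booleans in_single / in_double.
def pvGoA : List Char → Bool → Bool → List Char
  | [], _, _ => []
  | c :: cs, s, d =>
    if c = '\'' ∧ d = false then c :: pvGoA cs (!s) d
    else if c = '"' ∧ s = false then c :: pvGoA cs s (!d)
    else if c = '\\' ∧ s = false ∧ d = false then '\\' :: c :: pvGoA cs s d
    else c :: pvGoA cs s d

def escape_unquoted_backslashes_py (command : String) : String :=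
  String.mk (pvGoA command.toList false false)

-- ===== PORT B =====
-- str.replace('\\', '\\\\') on an unquoted run
def pvDbl (l : List Char) : List Char :=
  l.flatMap (fun c => if c = '\\' then ['\\', '\\'] else [c])

-- segment scanner: a quote char consumes up to its matching quote (or the rest of the
-- string if unterminated, as command.find returns -1); otherwise the maximal unquoted
-- run is taken and its backslashes doubled.
def pvSeg : List Char → List Char
  | [] => []
  | c :: cs =>
    if c = '\'' ∨ c = '"' then
      match _h : cs.dropWhile (fun x => x != c) with
      | [] => c :: cs.takeWhile (fun x => x != c)
      | _ :: rest' => c :: cs.takeWhile (fun x => x != c) ++ c :: pvSeg rest'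
    else
      pvDbl ((c :: cs).takeWhile (fun x => !(x == '\'') && !(x == '"'))) ++
        pvSeg ((c :: cs).dropWhile (fun x => !(x == '\'') && !(x == '"')))
termination_by l => l.length
decreasing_by
  · have h1 : (cs.dropWhile (fun x => x != c)).length ≤ cs.length :=
      List.length_dropWhile_le ..
    rw [_h] at h1
    simp at h1 ⊢
    omega
  · have hc : (!(c == '\'') && !(c == '"')) = true := by
      simp only [Bool.and_eq_true, Bool.not_eq_eq_eq_not, Bool.not_true, beq_eq_false_iff_ne]
      exact ⟨fun h => ‹¬(c = '\'' ∨ c = '"')› (Or.inl h) |>.elim, fun h => ‹¬(c = '\'' ∨ c = '"')› (Or.inr h) |>.elim⟩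
    rw [List.dropWhile_cons, if_pos hc]
    have := List.length_dropWhile_le (p := fun x => !(x == '\'') && !(x == '"')) (l := cs)
    simp
    omega

def escape_unquoted_backslashes_py_alt (command : String) : String :=
  String.mk (pvSeg command.toList)

-- ===== PRECONDITION & SPEC =====
def Spec_escape_unquoted_backslashes_py (command : String) (out : String) : Prop := out = escape_unquoted_backslashes_py_alt command
instance (command : String) (out : String) : Decidable (Spec_escape_unquoted_backslashes_py command out) := by unfold Spec_escape_unquoted_backslashes_py; infer_instance

-- ===== CLAIM (what is proved, stated in full; the proofs are below) =====
def Claim_equal_escape_unquoted_backslashes_py : Prop := ∀ (command : String), Dom_escape_unquoted_backslashes_py command → Spec_escape_unquoted_backslashes_py command (escape_unquoted_backslashes_py command)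

-- ===== LEMMAS AND PROOFS =====

-- inside single quotes A copies characters literally until the closing single quote
lemma goA_single (run rest : List Char) (h : ∀ x ∈ run, x ≠ '\'') :
    pvGoA (run ++ rest) true false = run ++ pvGoA rest true false := by
  induction run with
  | nil => simp
  | cons a l ih =>
    have ha : a ≠ '\'' := h a (by simp)
    simp only [List.cons_append, pvGoA]
    rw [if_neg (by simp [ha]), if_neg (by simp), if_neg (by simp)]
    simp [ih (fun x hx => h x (by simp [hx]))]

-- inside double quotes A copies characters literally until the closing double quote
lemma goA_double (run rest : List Char) (h : ∀ x ∈ run, x ≠ '"') :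
    pvGoA (run ++ rest) false true = run ++ pvGoA rest false true := by
  induction run with
  | nil => simp
  | cons a l ih =>
    have ha : a ≠ '"' := h a (by simp)
    simp only [List.cons_append, pvGoA]
    rw [if_neg (by simp), if_neg (by simp [ha]), if_neg (by simp)]
    simp [ih (fun x hx => h x (by simp [hx]))]

-- outside quotes A doubles backslashes across a quote-free run
lemma goA_unquoted (run rest : List Char) (h : ∀ x ∈ run, x ≠ '\'' ∧ x ≠ '"') :
    pvGoA (run ++ rest) false false = pvDbl run ++ pvGoA rest false false := by
  induction run with
  | nil => simp [pvDbl]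
  | cons a l ih =>
    have ha := h a (by simp)
    have ih' := ih (fun x hx => h x (by simp [hx]))
    by_cases hb : a = '\\'
    · simp only [List.cons_append, pvGoA]
      rw [if_neg (by simp [ha.1]), if_neg (by simp [ha.2]), if_pos (by simp [hb])]
      simp [pvDbl, hb, ih']
    · simp only [List.cons_append, pvGoA]
      rw [if_neg (by simp [ha.1]), if_neg (by simp [ha.2]), if_neg (by simp [hb])]
      simp [pvDbl, hb, ih']

lemma dropWhile_head_false {p : Char → Bool} {l : List Char} {q : Char} {r : List Char}
    (h : l.dropWhile p = q :: r) : p q = false := by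
  have h2 : l.dropWhile p ≠ [] := by simp [h]
  have := List.head_dropWhile_not (l := l) (p := p) h2
  simpa [h] using this

lemma pvSeg_quote (c : Char) (cs : List Char) (hc : c = '\'' ∨ c = '"') :
    pvSeg (c :: cs) =
      (match cs.dropWhile (fun x => x != c) with
        | [] => c :: cs.takeWhile (fun x => x != c)
        | _ :: rest' => c :: cs.takeWhile (fun x => x != c) ++ c :: pvSeg rest') := by
  rw [pvSeg]
  rw [if_pos hc]
  cases hdw : cs.dropWhile (fun x => x != c) <;> simp

lemma pvSeg_unquoted (c : Char) (cs : List Char) (hc : ¬ (c = '\'' ∨ c = '"')) :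
    pvSeg (c :: cs) =
      pvDbl ((c :: cs).takeWhile (fun x => !(x == '\'') && !(x == '"'))) ++
        pvSeg ((c :: cs).dropWhile (fun x => !(x == '\'') && !(x == '"'))) := by
  rw [pvSeg]
  rw [if_neg hc]

lemma goA_eq_seg : ∀ (n : ℕ) (l : List Char), l.length ≤ n → pvGoA l false false = pvSeg l := by
  intro n
  induction n with
  | zero =>
    intro l hl
    have : l = [] := List.eq_nil_of_length_eq_zero (Nat.le_zero.mp hl)
    simp [this, pvGoA, pvSeg]
  | succ n ih =>
    intro l hl
    match l with
    | [] => simp [pvGoA, pvSeg]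
    | c :: cs =>
      simp only [List.length_cons] at hl
      by_cases hq : c = '\'' ∨ c = '"'
      · -- quoted segment
        have htd := List.takeWhile_append_dropWhile (p := fun x => x != c) (l := cs)
        have hrun : ∀ x ∈ cs.takeWhile (fun x => x != c), x ≠ c := by
          intro x hx
          have := List.mem_takeWhile_imp hx
          simpa using this
        have hlen : (cs.dropWhile (fun x => x != c)).length ≤ cs.length :=
          List.length_dropWhile_le ..
        rw [pvSeg_quote c cs hq]
        rcases hq with hq | hq
        all_goals subst hq
        · -- single quote
          have hstep : pvGoA ('\'' :: cs) false false = '\'' :: pvGoA cs true false := by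
            simp [pvGoA]
          have hL : pvGoA cs true false
              = cs.takeWhile (fun x => x != '\'') ++ pvGoA (cs.dropWhile (fun x => x != '\'')) true false := by
            conv_lhs => rw [← htd]
            exact goA_single _ _ hrun
          rw [hstep, hL]
          match hdw : cs.dropWhile (fun x => x != '\'') with
          | [] => simp [pvGoA]
          | q :: rest' =>
            have hq' : q = '\'' := by simpa using dropWhile_head_false hdw
            subst hq'
            have hstep2 : pvGoA ('\'' :: rest') true false = '\'' :: pvGoA rest' false false := by
              simp [pvGoA]
            have hr : rest'.length ≤ n := by rw [hdw] at hlen; simp at hlen; omega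
            rw [hstep2, ih rest' hr]
            simp
        · -- double quote
          have hstep : pvGoA ('"' :: cs) false false = '"' :: pvGoA cs false true := by
            simp [pvGoA]
          have hL : pvGoA cs false true
              = cs.takeWhile (fun x => x != '"') ++ pvGoA (cs.dropWhile (fun x => x != '"')) false true := by
            conv_lhs => rw [← htd]
            exact goA_double _ _ hrun
          rw [hstep, hL]
          match hdw : cs.dropWhile (fun x => x != '"') with
          | [] => simp [pvGoA]
          | q :: rest' =>
            have hq' : q = '"' := by simpa using dropWhile_head_false hdw
            subst hq'
            have hstep2 : pvGoA ('"' :: rest') false true = '"' :: pvGoA rest' false false := by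
              simp [pvGoA]
            have hr : rest'.length ≤ n := by rw [hdw] at hlen; simp at hlen; omega
            rw [hstep2, ih rest' hr]
            simp
      · -- unquoted segment
        rw [not_or] at hq
        have hc : (!(c == '\'') && !(c == '"')) = true := by simp [hq.1, hq.2]
        have htd := List.takeWhile_append_dropWhile
          (p := fun x => !(x == '\'') && !(x == '"')) (l := c :: cs)
        have hrun : ∀ x ∈ (c :: cs).takeWhile (fun x => !(x == '\'') && !(x == '"')),
            x ≠ '\'' ∧ x ≠ '"' := by
          intro x hx
          have := List.mem_takeWhile_imp hx
          simpa using this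
        have hdrop : (c :: cs).dropWhile (fun x => !(x == '\'') && !(x == '"'))
            = cs.dropWhile (fun x => !(x == '\'') && !(x == '"')) := by
          rw [List.dropWhile_cons, if_pos hc]
        have hlen : ((c :: cs).dropWhile (fun x => !(x == '\'') && !(x == '"'))).length ≤ n := by
          rw [hdrop]
          have := List.length_dropWhile_le (p := fun x => !(x == '\'') && !(x == '"')) (l := cs)
          omega
        have hL : pvGoA (c :: cs) false false
            = pvDbl ((c :: cs).takeWhile (fun x => !(x == '\'') && !(x == '"')))
              ++ pvGoA ((c :: cs).dropWhile (fun x => !(x == '\'') && !(x == '"'))) false false := by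
          conv_lhs => rw [← htd]
          exact goA_unquoted _ _ hrun
        rw [hL, pvSeg_unquoted c cs (by simp [hq.1, hq.2]), ih _ hlen]

-- ===== VERDICT (by name: the statement is the Claim_ definition above) =====
theorem escape_unquoted_backslashes_py_spec : Claim_equal_escape_unquoted_backslashes_py := by
  intro command _
  unfold Spec_escape_unquoted_backslashes_py escape_unquoted_backslashes_py escape_unquoted_backslashes_py_alt
  rw [goA_eq_seg command.toList.length command.toList (le_refl _)]
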